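-- pv_equiv track=rewrite | github.com/yawnnn/RSAChat | rsa.py | asciiList2intBlocks
-- ===== SOURCE A (Python) =====
-- def asciiList2intBlocks(asciiList, length):
-- 	blocks = []
--
-- 	if len(asciiList) % length != 0:
-- 		for i in range(length - len(asciiList) % length):
-- 			asciiList.append(0)
--
-- 	for i in range(0, len(asciiList), length):
-- 		integer = 0b0
--
-- 		for j in range(length):
-- 			integer += asciiList[i + j] * pow(256, length - j - 1)
--
-- 		blocks.append(integer)
--
-- 	return blocks
-- ===== SOURCE B (Python) =====
-- def asciiList2intBlocks(asciiList, length):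
-- 	# Horner's rule: one left-to-right pass, integer = integer*256 + byte,
-- 	# no pow() per element. Pads asciiList in place like the original.
-- 	if len(asciiList) % length:
-- 		asciiList += [0] * (length - len(asciiList) % length)
--
-- 	blocks = []
-- 	integer = 0
-- 	count = 0
-- 	for byte in asciiList:
-- 		integer = integer * 256 + byte
-- 		count += 1
-- 		if count == length:
-- 			blocks.append(integer)
-- 			integer = 0
-- 			count = 0
--
-- 	return blocks
-- ===== Notes on version B (the rewrite author's own statement) =====
-- stated objective: faster
-- what changed: Replaces A's nested index loop that computes pow(256, length-j-1) for every byte by a single left-to-right Horner pass (integer = integer*256 + byte) with a block counter.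
import Mathlib
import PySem

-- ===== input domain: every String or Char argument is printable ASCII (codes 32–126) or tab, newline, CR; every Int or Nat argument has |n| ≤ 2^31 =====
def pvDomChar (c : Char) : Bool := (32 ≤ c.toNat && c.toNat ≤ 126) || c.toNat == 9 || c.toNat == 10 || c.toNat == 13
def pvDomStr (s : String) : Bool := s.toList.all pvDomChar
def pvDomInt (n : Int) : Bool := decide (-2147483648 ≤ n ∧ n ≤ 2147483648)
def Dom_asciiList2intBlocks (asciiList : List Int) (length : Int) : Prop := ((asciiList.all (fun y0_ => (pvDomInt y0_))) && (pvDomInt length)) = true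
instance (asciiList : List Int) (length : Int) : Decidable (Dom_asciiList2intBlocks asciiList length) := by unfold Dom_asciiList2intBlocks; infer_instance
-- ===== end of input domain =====

-- B replaces A's per-byte pow(256, …) inner loop by a single Horner pass (integer = integer*256 + byte).
-- Both Pythons pad `asciiList` in place the same way; the equivalence proved here is about the return value.

-- ===== PORT A =====
def asciiList2intBlocks (asciiList : List Int) (length : Int) : List Int :=
  let asciiList :=
    if PySem.Int.mod (PySem.List.len asciiList) length ≠ 0 then
      (PySem.List.pyRange 0 (length - PySem.Int.mod (PySem.List.len asciiList) length) 1).foldl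
        (fun lst _ => lst ++ [(0 : Int)]) asciiList
    else asciiList
  (PySem.List.pyRange 0 (PySem.List.len asciiList) length).foldl
    (fun blocks i =>
      let integer : Int :=
        (PySem.List.pyRange 0 length 1).foldl
          (fun integer j =>
            integer + PySem.List.pyGetD asciiList (i + j) 0 * 256 ^ (length - j - 1).toNat) 0
      blocks ++ [integer])
    []

-- ===== PORT B =====
-- loop body of B's single pass (helper for the port)
def pvBStep (length : Int) (st : List Int × Int × Int) (byte : Int) : List Int × Int × Int :=
  let integer := st.2.1 * 256 + byte
  let count := st.2.2 + 1
  if count = length then (st.1 ++ [integer], 0, 0) else (st.1, integer, count)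

def asciiList2intBlocks_alt (asciiList : List Int) (length : Int) : List Int :=
  let padded :=
    if PySem.Int.mod (PySem.List.len asciiList) length ≠ 0 then
      asciiList ++ List.replicate (length - PySem.Int.mod (PySem.List.len asciiList) length).toNat (0 : Int)
    else asciiList
  (padded.foldl (pvBStep length) ([], 0, 0)).1

-- ===== PRECONDITION & SPEC =====
-- Pre_ excludes exactly length = 0, where the Python A raises ZeroDivisionError on len(asciiList) % length.
def Pre_asciiList2intBlocks (asciiList : List Int) (length : Int) : Prop := length ≠ 0
instance (asciiList : List Int) (length : Int) : Decidable (Pre_asciiList2intBlocks asciiList length) := by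
  unfold Pre_asciiList2intBlocks; infer_instance

def pvWitness_asciiList2intBlocks : List Int × Int := ([65, 66, 67], 2)

def Spec_asciiList2intBlocks (asciiList : List Int) (length : Int) (out : List Int) : Prop := out = asciiList2intBlocks_alt asciiList length
instance (asciiList : List Int) (length : Int) (out : List Int) : Decidable (Spec_asciiList2intBlocks asciiList length out) := by unfold Spec_asciiList2intBlocks; infer_instance

-- ===== CLAIM (what is proved, stated in full; the proofs are below) =====
def Claim_equal_asciiList2intBlocks : Prop := ∀ (asciiList : List Int) (length : Int), Dom_asciiList2intBlocks asciiList length → Pre_asciiList2intBlocks asciiList length → Spec_asciiList2intBlocks asciiList length (asciiList2intBlocks asciiList length)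

-- ===== LEMMAS AND PROOFS =====

-- Horner value of a block
def pvHorner (c : List Int) : Int := c.foldl (fun a b => a * 256 + b) 0

theorem pvBStep_eq (L : Int) (bl : List Int) (acc k b : Int) :
    pvBStep L (bl, acc, k) b
      = if k + 1 = L then (bl ++ [acc * 256 + b], 0, 0) else (bl, acc * 256 + b, k + 1) := rfl

theorem pvRangeNegNil (a b s : Int) (hs : s < 0) (hab : a ≤ b) : PySem.List.pyRange a b s = [] := by
  simp [PySem.List.pyRange, hs.ne, not_lt.mpr hab, not_lt.mpr hs.le]

theorem pvFoldlHorner (c : List Int) : ∀ a : Int,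
    c.foldl (fun x b => x * 256 + b) a = a * 256 ^ c.length + pvHorner c := by
  induction c with
  | nil => intro a; simp [pvHorner]
  | cons b c ih =>
    intro a
    simp only [List.foldl_cons, List.length_cons, pvHorner] at *
    rw [ih (a * 256 + b), ih (0 * 256 + b)]
    ring

theorem pvSumHorner (c : List Int) :
    ((List.range c.length).map (fun k => c.getD k 0 * 256 ^ (c.length - 1 - k))).sum = pvHorner c := by
  induction c with
  | nil => simp [pvHorner]
  | cons b c ih =>
    have hh : pvHorner (b :: c) = b * 256 ^ c.length + pvHorner c := by
      simpa [pvHorner] using pvFoldlHorner c (0 * 256 + b)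
    rw [hh, List.length_cons, List.range_succ_eq_map, List.map_cons, List.map_map, List.sum_cons]
    have hmap : (List.map ((fun k => (b :: c).getD k 0 * 256 ^ (c.length + 1 - 1 - k)) ∘ Nat.succ)
        (List.range c.length)) = List.map (fun k => c.getD k 0 * 256 ^ (c.length - 1 - k)) (List.range c.length) := by
      refine List.map_congr_left (fun k hk => ?_)
      simp only [Function.comp]
      congr 1
      congr 1
      omega
    rw [hmap, ih]
    simp

-- A's inner loop computes the Horner value of the chunk at offset i
theorem pvInner (ℓ : Nat) (padded : List Int) (i : Nat) (hi : i + ℓ ≤ padded.length) :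
    (PySem.List.pyRange 0 (ℓ : Int) 1).foldl
      (fun acc j => acc + PySem.List.pyGetD padded ((i : Int) + j) 0 * 256 ^ (((ℓ : Int)) - j - 1).toNat) 0
    = pvHorner ((padded.drop i).take ℓ) := by
  set c := (padded.drop i).take ℓ with hc
  have hclen : c.length = ℓ := by
    simp only [hc, List.length_take, List.length_drop]
    omega
  rw [PySem.List.pyRange_one, List.foldl_map, PySem.List.foldl_add, zero_add,
      ← pvSumHorner c, hclen]
  have h0 : ((ℓ : Int) - 0).toNat = ℓ := by omega
  rw [h0]
  congr 1
  refine List.map_congr_left (fun k hk => ?_)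
  have hkl : k < ℓ := List.mem_range.mp hk
  have h1 : (i : Int) + ((0 : Int) + (k : Int)) = ((i + k : Nat) : Int) := by push_cast; ring
  rw [h1, PySem.List.pyGetD_natCast]
  have hik : i + k < padded.length := by omega
  have hkc : k < c.length := by omega
  rw [List.getD_eq_getElem padded 0 hik, List.getD_eq_getElem c 0 hkc]
  congr 1
  · simp [hc, List.getElem_take, List.getElem_drop]
  · congr 1
    omega

-- A's outer loop over the padded list
theorem pvAchunks (ℓ n : Nat) (hℓ : 0 < ℓ) (padded : List Int) (hlen : padded.length = ℓ * n) :
    (PySem.List.pyRange 0 ((padded.length : Nat) : Int) (ℓ : Int)).foldl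
      (fun blocks i =>
        blocks ++ [(PySem.List.pyRange 0 (ℓ : Int) 1).foldl
          (fun acc j => acc + PySem.List.pyGetD padded (i + j) 0 * 256 ^ (((ℓ : Int)) - j - 1).toNat) 0])
      []
    = (List.range n).map (fun k => pvHorner ((padded.drop (ℓ * k)).take ℓ)) := by
  rw [PySem.List.foldl_append_singleton_eq_map, List.nil_append,
      PySem.List.pyRange_of_pos (s := ((ℓ : Nat) : Int)) 0 ((padded.length : Nat) : Int) (by exact_mod_cast hℓ)]
  have hcnt : (if (0 : Int) < (padded.length : Int)
      then (((padded.length : Int) - 0 + (ℓ : Int) - 1) / (ℓ : Int)).toNat else 0) = n := by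
    by_cases hn : n = 0
    · subst hn
      simp_all
    · have hpos : (0 : Int) < (padded.length : Int) := by
        have : 0 < ℓ * n := Nat.mul_pos hℓ (Nat.pos_of_ne_zero hn)
        exact_mod_cast hlen ▸ this
      rw [if_pos hpos]
      have he : ((padded.length : Int) - 0 + (ℓ : Int) - 1) = ((ℓ : Int) - 1) + (ℓ : Int) * (n : Int) := by
        push_cast [hlen]; ring
      rw [he, Int.add_mul_ediv_left _ _ (by exact_mod_cast hℓ.ne')]
      rw [Int.ediv_eq_zero_of_lt (by omega) (by omega)]
      omega
  rw [hcnt, List.map_map]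
  refine List.map_congr_left (fun k hk => ?_)
  have hkn : k < n := List.mem_range.mp hk
  simp only [Function.comp]
  have h0 : (0 : Int) + (ℓ : Int) * (k : Int) = ((ℓ * k : Nat) : Int) := by push_cast; ring
  rw [h0]
  refine pvInner ℓ padded (ℓ * k) ?_
  calc ℓ * k + ℓ = ℓ * (k + 1) := by ring
    _ ≤ ℓ * n := Nat.mul_le_mul_left ℓ hkn
    _ = padded.length := hlen.symm

-- one chunk of B's pass
theorem pvBchunk (L : Int) (c : List Int) : ∀ (rest blocks : List Int) (acc k : Int),
    k + c.length = L → c ≠ [] →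
    (c ++ rest).foldl (pvBStep L) (blocks, acc, k)
      = rest.foldl (pvBStep L) (blocks ++ [c.foldl (fun a b => a * 256 + b) acc], 0, 0) := by
  induction c with
  | nil => intro rest blocks acc k h hne; exact absurd rfl hne
  | cons b c ih =>
    intro rest blocks acc k h hne
    rw [List.cons_append, List.foldl_cons, pvBStep_eq]
    cases c with
    | nil =>
      have hk : k + 1 = L := by simpa using h
      rw [if_pos hk]
      simp
    | cons b2 c2 =>
      have hk : k + 1 ≠ L := by
        simp only [List.length_cons] at h
        push_cast at h
        omega
      rw [if_neg hk]
      rw [ih rest blocks (acc * 256 + b) (k + 1)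
        (by simp only [List.length_cons] at h ⊢; push_cast at h ⊢; omega) (by simp)]
      simp [List.foldl_cons]

-- B's whole pass over a list of n chunks
theorem pvBrun (ℓ : Nat) (hℓ : 0 < ℓ) : ∀ (n : Nat) (xs blocks : List Int), xs.length = ℓ * n →
    (xs.foldl (pvBStep (ℓ : Int)) (blocks, 0, 0)).1
      = blocks ++ (List.range n).map (fun k => pvHorner ((xs.drop (ℓ * k)).take ℓ)) := by
  intro n
  induction n with
  | zero =>
    intro xs blocks h
    have hnil : xs = [] := List.eq_nil_of_length_eq_zero (by simpa using h)
    subst hnil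
    simp
  | succ n ih =>
    intro xs blocks h
    have hle : ℓ ≤ xs.length := by rw [h, Nat.mul_succ]; omega
    have h1 : (xs.take ℓ).length = ℓ := by rw [List.length_take]; omega
    have hd : (xs.drop ℓ).length = ℓ * n := by rw [List.length_drop, h, Nat.mul_succ]; omega
    conv_lhs => rw [← List.take_append_drop ℓ xs]
    rw [pvBchunk ((ℓ : Nat) : Int) (xs.take ℓ) (xs.drop ℓ) blocks 0 0
      (by rw [h1]; simp) (by intro hc; rw [hc] at h1; simp at h1; omega)]
    rw [ih (xs.drop ℓ) _ hd]
    rw [List.range_succ_eq_map, List.map_cons, List.map_map]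
    have hzero : pvHorner ((xs.drop (ℓ * 0)).take ℓ) = (xs.take ℓ).foldl (fun a b => a * 256 + b) 0 := by
      simp [pvHorner]
    have htail : (List.range n).map ((fun k => pvHorner ((xs.drop (ℓ * k)).take ℓ)) ∘ Nat.succ)
        = (List.range n).map (fun k => pvHorner (((xs.drop ℓ).drop (ℓ * k)).take ℓ)) := by
      refine List.map_congr_left (fun k hk => ?_)
      simp only [Function.comp]
      rw [List.drop_drop]
      have hmul : ℓ * Nat.succ k = ℓ + ℓ * k := by rw [Nat.succ_eq_add_one]; ring
      rw [hmul]
    rw [htail, hzero]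
    simp [List.append_assoc]

-- B's pass appends nothing when length is negative (the counter stays nonnegative)
theorem pvBneg (L : Int) (hL : L < 0) (xs : List Int) : ∀ (blocks : List Int) (acc k : Int), 0 ≤ k →
    (xs.foldl (pvBStep L) (blocks, acc, k)).1 = blocks := by
  induction xs with
  | nil => intro blocks acc k _; simp
  | cons b xs ih =>
    intro blocks acc k hk
    rw [List.foldl_cons, pvBStep_eq, if_neg (by omega)]
    exact ih blocks (acc * 256 + b) (k + 1) (by omega)

-- both ports on a positive length
theorem pvPos (ℓ : Nat) (hℓ : 0 < ℓ) (xs : List Int) :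
    asciiList2intBlocks xs (ℓ : Int) = asciiList2intBlocks_alt xs (ℓ : Int) := by
  simp only [asciiList2intBlocks, asciiList2intBlocks_alt, PySem.List.len_eq]
  by_cases hm : PySem.Int.mod ((xs.length : Nat) : Int) ((ℓ : Nat) : Int) = 0
  · rw [if_neg (not_not_intro hm), if_neg (not_not_intro hm)]
    obtain ⟨t, ht⟩ := (PySem.Int.mod_eq_zero_iff_dvd _ _).mp hm
    have ht0 : 0 ≤ t := by nlinarith [Int.natCast_nonneg xs.length, Int.natCast_pos.mpr hℓ]
    have hlen : xs.length = ℓ * t.toNat := by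
      have := ht
      rw [← Int.toNat_of_nonneg ht0] at this
      exact_mod_cast this
    rw [pvAchunks ℓ t.toNat hℓ xs hlen, pvBrun ℓ hℓ t.toNat xs [] hlen]
    simp
  · rw [if_pos hm, if_pos hm]
    rw [PySem.List.foldl_append_singleton_eq_map (fun _ => (0 : Int)), List.map_const',
        PySem.List.length_pyRange_one, sub_zero]
    set m := PySem.Int.mod ((xs.length : Nat) : Int) ((ℓ : Nat) : Int) with hmdef
    have hm0 : 0 ≤ m := PySem.Int.mod_nonneg _ (by exact_mod_cast hℓ)
    have hmlt : m < (ℓ : Int) := PySem.Int.mod_lt _ (by exact_mod_cast hℓ)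
    set p := ((ℓ : Int) - m).toNat with hpdef
    have hp : (p : Int) = (ℓ : Int) - m := Int.toNat_of_nonneg (by omega)
    set padded := xs ++ List.replicate p (0 : Int) with hpad
    have hplen : padded.length = xs.length + p := by simp [hpad]
    have hqm := PySem.Int.floordiv_mul_add_mod ((xs.length : Nat) : Int) ((ℓ : Nat) : Int)
    set q := PySem.Int.floordiv ((xs.length : Nat) : Int) ((ℓ : Nat) : Int) with hqdef
    rw [← hmdef] at hqm
    have hq0 : 0 ≤ q := by
      by_contra hcon
      have hq1 : q ≤ -1 := by omega
      have : q * (ℓ : Int) ≤ -1 * (ℓ : Int) :=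
        mul_le_mul_of_nonneg_right hq1 (by exact_mod_cast hℓ.le)
      have hxl : (0 : Int) ≤ (xs.length : Int) := Int.natCast_nonneg _
      linarith
    set n := (q + 1).toNat with hndef
    have hn : (n : Int) = q + 1 := Int.toNat_of_nonneg (by omega)
    have hlen : padded.length = ℓ * n := by
      have hcast : (padded.length : Int) = (ℓ : Int) * (n : Int) := by
        rw [hn, hplen]
        push_cast [hp]
        linear_combination -hqm
      exact_mod_cast hcast
    rw [pvAchunks ℓ n hℓ padded hlen, pvBrun ℓ hℓ n padded [] hlen]
    simp

-- ===== VERDICT (by name: the statement is the Claim_ definition above) =====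
theorem asciiList2intBlocks_spec : Claim_equal_asciiList2intBlocks := by
  intro xs L _ hpre
  unfold Spec_asciiList2intBlocks
  unfold Pre_asciiList2intBlocks at hpre
  rcases lt_or_gt_of_ne hpre with hL | hL
  · -- L < 0: both programs produce []
    simp only [asciiList2intBlocks, asciiList2intBlocks_alt, PySem.List.len_eq]
    have hbounds := PySem.Int.mod_neg_bounds ((xs.length : Nat) : Int) hL
    have hlen0 : (0 : Int) ≤ ((xs.length : Nat) : Int) := Int.natCast_nonneg _
    by_cases hm : PySem.Int.mod ((xs.length : Nat) : Int) L = 0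
    · rw [if_neg (not_not_intro hm), if_neg (not_not_intro hm)]
      rw [pvRangeNegNil 0 ((xs.length : Nat) : Int) L hL hlen0, List.foldl_nil]
      exact (pvBneg L hL xs [] 0 0 le_rfl).symm
    · rw [if_pos hm, if_pos hm]
      rw [PySem.List.pyRange_one_eq_nil (by omega), List.foldl_nil]
      have hpz : (L - PySem.Int.mod ((xs.length : Nat) : Int) L).toNat = 0 := by omega
      rw [hpz, List.replicate_zero, List.append_nil]
      rw [pvRangeNegNil 0 ((xs.length : Nat) : Int) L hL hlen0, List.foldl_nil]
      exact (pvBneg L hL xs [] 0 0 le_rfl).symm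
  · -- 0 < L
    have hLl : L = ((L.toNat : Nat) : Int) := (Int.toNat_of_nonneg hL.le).symm
    rw [hLl]
    exact pvPos L.toNat (by omega) xs
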